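-- pv_equiv track=rewrite | github.com/take4ff/gmp | old_file/20250710/20250705_filter.py | get_non_encompassed_sequences
-- ===== SOURCE A (Python) =====
-- def is_sublist(sublist, mainlist):
--     n = len(mainlist)
--     m = len(sublist)
--     if m == 0:  # 空のリストは常に任意のリストの部分リストとみなす
--         return True
--     if m > n:   # 部分リストがメインリストより長い場合は、部分リストになりえない
--         return False
--
--     # メインリストの各開始位置から部分リストと一致するかチェック
--     for i in range(n - m + 1):
--         if mainlist[i : i + m] == sublist:
--             return True
--     return False
--
-- def get_non_encompassed_sequences(sequences):
--     if not sequences: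
--         return []
--
--     # set() を使うために、内部リストをタプルに変換してハッシュ可能にする
--     # 重複を除去し、長さに応じてソート
--     unique_sequences = [list(item) for item in dict.fromkeys(tuple(path) for path in sequences)]
--
--     # 長さでソート（短いものが先に来るように）
--     sorted_sequences = sorted(unique_sequences, key=len)
--
--     non_encompassed = []
--
--     for i, current_seq in enumerate(sorted_sequences):
--         is_encompassed = False
--
--         # 現在のシーケンスが他のどのシーケンスに内包されていないかを確認
--         for j, other_seq in enumerate(sorted_sequences):
--             if i == j:  # 自分自身との比較はスキップ
--                 continue
--
--             # current_seq が other_seq に完全に内包されているか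
--             # is_sublist ヘルパー関数を使用
--             if is_sublist(current_seq, other_seq):
--                 is_encompassed = True
--                 break # 一つでも内包されていれば、それは非内包ではないので次のシーケンスへ
--
--         if not is_encompassed:
--             non_encompassed.append(current_seq)
--
--     return non_encompassed
-- ===== SOURCE B (Python) =====
-- def get_non_encompassed_sequences(sequences):
--     if not sequences:
--         return []
--     # dedupe (first occurrences), then stable-sort by length
--     unique = [list(t) for t in dict.fromkeys(map(tuple, sequences))]
--     unique.sort(key=len)
--     # collect every proper contiguous sublist (restricted to lengths that occur)
--     # into one hash set; a sequence is encompassed iff it appears in that set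
--     lengths = {len(s) for s in unique}
--     proper = set()
--     for s in unique:
--         t = tuple(s)
--         for m in lengths:
--             if m < len(s):
--                 for i in range(len(s) - m + 1):
--                     proper.add(t[i:i + m])
--     return [s for s in unique if tuple(s) not in proper]
-- ===== Notes on version B (the rewrite author's own statement) =====
-- stated objective: faster
-- what changed: Instead of testing every deduplicated sequence against every other with a quadratic pairwise is_sublist scan, B builds one hash set of all proper contiguous sublists (restricted to lengths that actually occur) and decides 'encompassed' by a single set-membership lookup per sequence.
import Mathlib
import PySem

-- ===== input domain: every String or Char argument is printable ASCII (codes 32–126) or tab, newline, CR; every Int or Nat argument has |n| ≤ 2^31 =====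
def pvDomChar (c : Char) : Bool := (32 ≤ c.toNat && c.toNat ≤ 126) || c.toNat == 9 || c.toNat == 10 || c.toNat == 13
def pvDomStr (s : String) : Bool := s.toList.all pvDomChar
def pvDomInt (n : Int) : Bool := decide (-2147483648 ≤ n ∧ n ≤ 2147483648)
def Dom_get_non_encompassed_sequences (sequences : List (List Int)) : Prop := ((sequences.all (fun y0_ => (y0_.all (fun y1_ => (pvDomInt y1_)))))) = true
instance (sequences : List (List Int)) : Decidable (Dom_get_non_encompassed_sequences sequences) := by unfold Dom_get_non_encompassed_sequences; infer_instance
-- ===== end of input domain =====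

-- B replaces A's pairwise scans (each sequence tested by is_sublist against every other)
-- by one hash set holding every proper contiguous sublist (of an occurring length) of
-- every deduplicated sequence; a single set-membership test then decides "encompassed".
-- Objective: alternative algorithm, same return value.

-- ===== PORT A =====
def isSublist (sub main : List Int) : Bool :=
  let n : Int := main.length
  let m : Int := sub.length
  if m = 0 then true
  else if m > n then false
  else (PySem.List.pyRange 0 (n - m + 1) 1).any
        (fun i => PySem.List.slice main (some i) (some (i + m)) == sub)

def get_non_encompassed_sequences (sequences : List (List Int)) : List (List Int) :=
  if sequences = [] then []
  else
    let uniq := PySem.List.dedup sequences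
    let sortedSeqs := PySem.List.sorted uniq (fun s => (s.length : Int)) false
    (PySem.List.enumerate sortedSeqs 0).foldl
      (fun acc p =>
        let isEnc := (PySem.List.enumerate sortedSeqs 0).any
          (fun q => q.1 != p.1 && isSublist p.2 q.2)
        if isEnc then acc else acc ++ [p.2]) []

-- ===== PORT B =====
def get_non_encompassed_sequences_alt (sequences : List (List Int)) : List (List Int) :=
  if sequences = [] then []
  else
    let uniq := PySem.List.dedup sequences
    let sortedSeqs := PySem.List.sorted uniq (fun s => (s.length : Int)) false
    let lengths : PySem.Set Int := PySem.Set.ofList (sortedSeqs.map (fun s => (s.length : Int)))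
    let proper : PySem.Set (List Int) :=
      sortedSeqs.foldl (fun acc s =>
        lengths.foldl (fun acc2 m =>
          if m < (s.length : Int) then
            (PySem.List.pyRange 0 ((s.length : Int) - m + 1) 1).foldl
              (fun acc3 i => PySem.Set.add acc3 (PySem.List.slice s (some i) (some (i + m)))) acc2
          else acc2) acc) PySem.Set.empty
    sortedSeqs.filter (fun s => !(PySem.Set.contains proper s))

-- ===== PRECONDITION & SPEC =====
def Spec_get_non_encompassed_sequences (sequences : List (List Int)) (out : List (List Int)) : Prop := out = get_non_encompassed_sequences_alt sequences
instance (sequences : List (List Int)) (out : List (List Int)) : Decidable (Spec_get_non_encompassed_sequences sequences out) := by unfold Spec_get_non_encompassed_sequences; infer_instance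

-- ===== CLAIM (what is proved, stated in full; the proofs are below) =====
def Claim_equal_get_non_encompassed_sequences : Prop := ∀ (sequences : List (List Int)), Dom_get_non_encompassed_sequences sequences → Spec_get_non_encompassed_sequences sequences (get_non_encompassed_sequences sequences)

-- ===== LEMMAS AND PROOFS =====
-- generic: membership through a foldl whose step adds exactly the elements satisfying P
theorem mem_foldl_step {β : Type} (cur : List Int) (P : β → Prop)
    (f : PySem.Set (List Int) → β → PySem.Set (List Int))
    (hf : ∀ acc x, cur ∈ f acc x ↔ cur ∈ acc ∨ P x) :
    ∀ (xs : List β) (acc : PySem.Set (List Int)),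
      cur ∈ xs.foldl f acc ↔ cur ∈ acc ∨ ∃ x ∈ xs, P x := by
  intro xs
  induction xs with
  | nil => simp
  | cons x xs ih =>
      intro acc
      rw [List.foldl_cons, ih (f acc x), hf]
      simp only [List.mem_cons]
      constructor
      · rintro ((h | h) | ⟨y, hy, hP⟩)
        · exact Or.inl h
        · exact Or.inr ⟨x, Or.inl rfl, h⟩
        · exact Or.inr ⟨y, Or.inr hy, hP⟩
      · rintro (h | ⟨y, (rfl | hy), hP⟩)
        · exact Or.inl (Or.inl h)
        · exact Or.inl (Or.inr hP)
        · exact Or.inr ⟨y, hy, hP⟩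

theorem mem_inner (cur s : List Int) (m : Int) (acc : PySem.Set (List Int)) :
    cur ∈ (PySem.List.pyRange 0 ((s.length : Int) - m + 1) 1).foldl
        (fun acc3 i => PySem.Set.add acc3 (PySem.List.slice s (some i) (some (i + m)))) acc
      ↔ cur ∈ acc ∨ ∃ i ∈ PySem.List.pyRange 0 ((s.length : Int) - m + 1) 1,
          cur = PySem.List.slice s (some i) (some (i + m)) :=
  mem_foldl_step cur (fun i => cur = PySem.List.slice s (some i) (some (i + m)))
    (fun acc3 i => PySem.Set.add acc3 (PySem.List.slice s (some i) (some (i + m))))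
    (fun acc i => PySem.Set.mem_add acc _ cur) _ acc

theorem mem_middle (cur s : List Int) (lengths : List Int) (acc : PySem.Set (List Int)) :
    cur ∈ lengths.foldl (fun acc2 m =>
        if m < (s.length : Int) then
          (PySem.List.pyRange 0 ((s.length : Int) - m + 1) 1).foldl
            (fun acc3 i => PySem.Set.add acc3 (PySem.List.slice s (some i) (some (i + m)))) acc2
        else acc2) acc
      ↔ cur ∈ acc ∨ ∃ m ∈ lengths, m < (s.length : Int) ∧
          ∃ i ∈ PySem.List.pyRange 0 ((s.length : Int) - m + 1) 1,
            cur = PySem.List.slice s (some i) (some (i + m)) := by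
  refine mem_foldl_step cur _ _ (fun acc m => ?_) lengths acc
  by_cases h : m < (s.length : Int)
  · rw [if_pos h, mem_inner]; simp [h]
  · rw [if_neg h]; simp [h]

theorem mem_proper (cur : List Int) (L : List (List Int)) (lengths : List Int) :
    cur ∈ L.foldl (fun acc s =>
        lengths.foldl (fun acc2 m =>
          if m < (s.length : Int) then
            (PySem.List.pyRange 0 ((s.length : Int) - m + 1) 1).foldl
              (fun acc3 i => PySem.Set.add acc3 (PySem.List.slice s (some i) (some (i + m)))) acc2
          else acc2) acc) PySem.Set.empty
      ↔ ∃ s ∈ L, ∃ m ∈ lengths, m < (s.length : Int) ∧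
          ∃ i ∈ PySem.List.pyRange 0 ((s.length : Int) - m + 1) 1,
            cur = PySem.List.slice s (some i) (some (i + m)) := by
  rw [mem_foldl_step cur _ _ (fun acc s => mem_middle cur s lengths acc) L PySem.Set.empty]
  simp [PySem.Set.empty]

-- the semantic heart: "cur is a contiguous sublist of some OTHER element of L"
-- equals "cur occurs as a proper slice (of an occurring length) of some element of L"
theorem enc_iff (L : List (List Int)) (cur : List Int) (hcur : cur ∈ L) :
    (∃ s ∈ L, s ≠ cur ∧ isSublist cur s = true) ↔
    (∃ s ∈ L, ∃ m ∈ (PySem.Set.ofList (L.map (fun t => (t.length : Int))) : List Int),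
        m < (s.length : Int) ∧
        ∃ i ∈ PySem.List.pyRange 0 ((s.length : Int) - m + 1) 1,
          cur = PySem.List.slice s (some i) (some (i + m))) := by
  constructor
  · rintro ⟨s, hs, hne, hsub⟩
    refine ⟨s, hs, (cur.length : Int), ?_, ?_⟩
    · rw [PySem.Set.mem_ofList]
      exact List.mem_map.mpr ⟨cur, hcur, rfl⟩
    by_cases hc : cur = []
    · subst hc
      have hslen : 0 < s.length := List.length_pos_iff.mpr (fun h => hne (h.trans rfl))
      have hsl : (0:Int) < (s.length : Int) := by exact_mod_cast hslen
      refine ⟨by simpa using hsl, 0, ?_, ?_⟩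
      · rw [PySem.List.mem_pyRange_one]
        simp only [List.length_nil, Nat.cast_zero]
        omega
      · rw [PySem.List.slice_toNat s le_rfl (by norm_num)]
        simp
    · have hm0 : (cur.length : Int) ≠ 0 := by
        simpa using (fun h => hc (List.length_eq_zero_iff.mp h))
      unfold isSublist at hsub
      rw [if_neg hm0] at hsub
      by_cases hgt : (cur.length : Int) > (s.length : Int)
      · rw [if_pos hgt] at hsub; exact absurd hsub (by simp)
      rw [if_neg hgt] at hsub
      obtain ⟨i, hiR, hbeq⟩ := List.any_eq_true.mp hsub
      have hslice : PySem.List.slice s (some i) (some (i + (cur.length : Int))) = cur :=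
        by simpa using hbeq
      have hilt := PySem.List.mem_pyRange_one.mp hiR
      have hlt : (cur.length : Int) < (s.length : Int) := by
        rcases lt_or_eq_of_le (not_lt.mp hgt) with h | h
        · exact h
        · exfalso
          have hi0 : i = 0 := by omega
          subst hi0
          rw [PySem.List.slice_toNat s le_rfl (by omega)] at hslice
          simp only [Int.toNat_zero, List.drop_zero, Nat.sub_zero] at hslice
          have : s.length ≤ (((0:Int) + (cur.length : Int)).toNat) := by omega
          rw [List.take_of_length_le this] at hslice
          exact hne (hslice ▸ rfl)
      exact ⟨hlt, i, hiR, hslice.symm⟩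
  · rintro ⟨s, hs, m, hmmem, hlt, i, hiR, hslice⟩
    have hm0 : 0 ≤ m := by
      rw [PySem.Set.mem_ofList] at hmmem
      obtain ⟨t, _, rfl⟩ := List.mem_map.mp hmmem
      positivity
    have hilt := PySem.List.mem_pyRange_one.mp hiR
    have him : 0 ≤ i + m := by omega
    rw [PySem.List.slice_toNat s hilt.1 him] at hslice
    have htn : (i + m).toNat = i.toNat + m.toNat := by omega
    have hcl : cur.length = m.toNat := by
      rw [hslice]
      simp only [List.length_take, List.length_drop, htn]
      omega
    have hclen : (cur.length : Int) = m := by rw [hcl]; omega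
    refine ⟨s, hs, ?_, ?_⟩
    · intro h
      rw [← h] at hclen
      omega
    · unfold isSublist
      by_cases hz : (cur.length : Int) = 0
      · rw [if_pos hz]
      rw [if_neg hz, if_neg (by omega)]
      refine List.any_eq_true.mpr ⟨i, ?_, ?_⟩
      · rw [PySem.List.mem_pyRange_one]; omega
      · rw [beq_iff_eq, hclen, PySem.List.slice_toNat s hilt.1 him, hslice]

-- A's inner enumerate/any with the self-index skip, on a duplicate-free list
theorem anyA (L : List (List Int)) (hnd : L.Nodup) (p : Int × List Int)
    (hp : p ∈ PySem.List.enumerate L 0) :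
    ((PySem.List.enumerate L 0).any (fun q => q.1 != p.1 && isSublist p.2 q.2) = true) ↔
      ∃ s ∈ L, s ≠ p.2 ∧ isSublist p.2 s = true := by
  obtain ⟨k, hk, rfl⟩ := (PySem.List.mem_enumerate_iff L 0 p).mp hp
  rw [List.any_eq_true]
  constructor
  · rintro ⟨q, hq, hb⟩
    obtain ⟨j, hj, rfl⟩ := (PySem.List.mem_enumerate_iff L 0 q).mp hq
    simp only [Bool.and_eq_true, bne_iff_ne, ne_eq] at hb
    refine ⟨L[j], List.getElem_mem hj, ?_, hb.2⟩
    intro h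
    exact hb.1 (by have := (hnd.getElem_inj_iff).mp h; omega)
  · rintro ⟨s, hs, hne, hsub⟩
    obtain ⟨j, hj, rfl⟩ := List.mem_iff_getElem.mp hs
    refine ⟨(0 + (j : Int), L[j]), (PySem.List.mem_enumerate_iff L 0 _).mpr ⟨j, hj, rfl⟩, ?_⟩
    simp only [Bool.and_eq_true, bne_iff_ne, ne_eq]
    refine ⟨fun h => hne ?_, hsub⟩
    have hjk : j = k := by omega
    subst hjk
    rfl

theorem filtEnum (q : Int × List Int → Bool) (p : List Int → Bool) :
    ∀ (L : List (List Int)) (s : Int), (∀ x ∈ PySem.List.enumerate L s, q x = p x.2) →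
      ((PySem.List.enumerate L s).filter q).map (·.2) = L.filter p := by
  intro L
  induction L with
  | nil => intro s _; simp [PySem.List.enumerate]
  | cons x xs ih =>
      intro s h
      rw [PySem.List.enumerate_cons]
      have hx := h (s, x) (by rw [PySem.List.enumerate_cons]; exact List.mem_cons_self)
      have ht := ih (s + 1) (fun y hy => h y (by rw [PySem.List.enumerate_cons]; exact List.mem_cons_of_mem _ hy))
      by_cases hpx : p x
      · simp [List.filter_cons, hx, hpx, ht]
      · simp [List.filter_cons, hx, hpx, ht, Bool.eq_false_iff.mpr]

theorem main_spec (sequences : List (List Int)) :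
    get_non_encompassed_sequences sequences = get_non_encompassed_sequences_alt sequences := by
  unfold get_non_encompassed_sequences get_non_encompassed_sequences_alt
  by_cases h : sequences = []
  · simp [h]
  rw [if_neg h, if_neg h]
  set L := PySem.List.sorted (PySem.List.dedup sequences) (fun s => (s.length : Int)) false with hL
  have hnd : L.Nodup :=
    ((PySem.List.sorted_perm (PySem.List.dedup sequences) _ false).nodup_iff).mpr
      (PySem.List.nodup_dedup sequences)
  have hfun : (fun (acc : List (List Int)) (p : Int × List Int) =>
      if ((PySem.List.enumerate L 0).any (fun q => q.1 != p.1 && isSublist p.2 q.2)) then acc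
      else acc ++ [p.2]) =
      (fun acc p =>
        if (!((PySem.List.enumerate L 0).any (fun q => q.1 != p.1 && isSublist p.2 q.2))) then
          acc ++ [p.2] else acc) := by
    funext acc p
    cases hcp : ((PySem.List.enumerate L 0).any (fun q => q.1 != p.1 && isSublist p.2 q.2)) <;>
      simp [hcp]
  show (PySem.List.enumerate L 0).foldl _ [] = L.filter _
  rw [hfun, PySem.List.foldl_append_if]
  rw [List.nil_append]
  apply filtEnum
  intro x hx
  obtain ⟨k, hk, hxk⟩ := (PySem.List.mem_enumerate_iff L 0 x).mp hx
  have hx2 : x.2 ∈ L := by rw [hxk]; exact List.getElem_mem hk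
  have hcont : ∀ (S : PySem.Set (List Int)) (y : List Int),
      PySem.Set.contains S y = true ↔ y ∈ S := by
    intro S y; simp [PySem.Set.contains]
  have key : ((PySem.List.enumerate L 0).any (fun q => q.1 != x.1 && isSublist x.2 q.2)) =
      (PySem.Set.contains (L.foldl (fun acc s =>
        (PySem.Set.ofList (L.map (fun s => (s.length : Int)))).foldl (fun acc2 m =>
          if m < (s.length : Int) then
            (PySem.List.pyRange 0 ((s.length : Int) - m + 1) 1).foldl
              (fun acc3 i => PySem.Set.add acc3 (PySem.List.slice s (some i) (some (i + m)))) acc2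
          else acc2) acc) PySem.Set.empty) x.2) := by
    rw [Bool.eq_iff_iff, anyA L hnd x hx, enc_iff L x.2 hx2, hcont, mem_proper]
  rw [key]

-- ===== VERDICT (by name: the statement is the Claim_ definition above) =====
theorem get_non_encompassed_sequences_spec : Claim_equal_get_non_encompassed_sequences := by
  intro sequences _
  exact main_spec sequences
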